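-- pv_equiv track=rewrite | github.com/Speed-Jobs/backend-model | app/services/dashboard/recruitment_schedule.py | parse_date_range
-- ===== SOURCE A (Python) =====
-- def parse_date_range(date_array: list) -> tuple:
--     """
--     JSON 날짜 배열을 파싱하여 (start_date, end_date)를 반환합니다.
--     여러 개의 날짜 범위가 있으면 전체 범위(최소 ~ 최대)를 계산합니다.
--     """
--     if not date_array or len(date_array) == 0:
--         return (None, None)
--
--     all_dates = []
--     for date_range in date_array:
--         if len(date_range) < 2:
--             continue
--
--         if date_range[0]:
--             all_dates.append(date_range[0])
--
--         if date_range[1]: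
--             all_dates.append(date_range[1])
--         elif date_range[0]:
--             all_dates.append(date_range[0])
--
--     if not all_dates:
--         return (None, None)
--
--     start_date = min(all_dates)
--     end_date = max(all_dates)
--
--     return (start_date, end_date)
-- ===== SOURCE B (Python) =====
-- def parse_date_range(date_array: list) -> tuple:
--     """Same result as A, but with running min/max accumulators instead of
--     collecting all dates into a list and calling min/max at the end."""
--     start_date = None
--     end_date = None
--     for date_range in date_array:
--         if len(date_range) < 2:
--             continue
--         for d in (date_range[0], date_range[1]):
--             if d:
--                 if start_date is None or d < start_date:
--                     start_date = d
--                 if end_date is None or end_date < d: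
--                     end_date = d
--     return (start_date, end_date)
-- ===== Notes on version B (the rewrite author's own statement) =====
-- stated objective: simpler
-- what changed: B folds each date into two running min/max accumulators in a single pass instead of building an all_dates list (with A's duplicate append) and reducing it with min()/max() afterwards.
import Mathlib
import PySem

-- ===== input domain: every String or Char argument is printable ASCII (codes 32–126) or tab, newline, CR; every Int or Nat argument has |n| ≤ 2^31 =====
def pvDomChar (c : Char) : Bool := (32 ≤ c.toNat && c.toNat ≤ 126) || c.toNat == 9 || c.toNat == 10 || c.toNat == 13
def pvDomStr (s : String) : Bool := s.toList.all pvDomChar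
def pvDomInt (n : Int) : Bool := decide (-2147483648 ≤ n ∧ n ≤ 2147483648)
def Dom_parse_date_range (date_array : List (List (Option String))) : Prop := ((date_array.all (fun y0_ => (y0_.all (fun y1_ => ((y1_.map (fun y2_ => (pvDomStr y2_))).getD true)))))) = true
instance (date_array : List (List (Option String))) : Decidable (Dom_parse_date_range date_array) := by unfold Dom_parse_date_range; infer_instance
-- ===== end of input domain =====

-- B replaces A's all_dates list + final min()/max() by two running min/max accumulators (simpler, O(1) extra space).

-- ===== PORT A =====
-- Python truthiness of an Optional[str]: None and "" are falsy.
def pvTruthyOS : Option String → Bool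
  | none => false
  | some s => !(s == "")

-- loop body of A's 'for date_range in date_array' (appends to all_dates)
def pvStepA (acc : List String) (date_range : List (Option String)) : List String :=
  if date_range.length < 2 then acc
  else
    let d0 := PySem.List.pyGetD date_range 0 none
    let d1 := PySem.List.pyGetD date_range 1 none
    let acc := if pvTruthyOS d0 then acc ++ [d0.getD ""] else acc
    if pvTruthyOS d1 then acc ++ [d1.getD ""]
    else if pvTruthyOS d0 then acc ++ [d0.getD ""] else acc

def parse_date_range (date_array : List (List (Option String))) : Option String × Option String :=
  if date_array = [] ∨ date_array.length = 0 then (none, none)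
  else
    let all_dates := date_array.foldl pvStepA []
    if all_dates = [] then (none, none)
    else (PySem.List.min? all_dates (fun x => x), PySem.List.max? all_dates (fun x => x))

-- ===== PORT B =====
-- fold one optional date into the running (start_date, end_date) pair ('if d:' body of Source B)
def pvFoldIn (p : Option String × Option String) (d : Option String) : Option String × Option String :=
  match d with
  | none => p
  | some s =>
    if s = "" then p
    else
      (match p.1 with | none => some s | some a => if s < a then some s else some a,
       match p.2 with | none => some s | some b => if b < s then some s else some b)

-- loop body of Source B's 'for date_range in date_array'
def pvStepB (p : Option String × Option String) (date_range : List (Option String)) :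
    Option String × Option String :=
  if date_range.length < 2 then p
  else pvFoldIn (pvFoldIn p (PySem.List.pyGetD date_range 0 none)) (PySem.List.pyGetD date_range 1 none)

def parse_date_range_alt (date_array : List (List (Option String))) : Option String × Option String :=
  date_array.foldl pvStepB (none, none)

-- ===== PRECONDITION & SPEC =====
def Spec_parse_date_range (date_array : List (List (Option String))) (out : Option String × Option String) : Prop := out = parse_date_range_alt date_array
instance (date_array : List (List (Option String))) (out : Option String × Option String) : Decidable (Spec_parse_date_range date_array out) := by unfold Spec_parse_date_range; infer_instance

-- ===== CLAIM (what is proved, stated in full; the proofs are below) =====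
def Claim_equal_parse_date_range : Prop := ∀ (date_array : List (List (Option String))), Dom_parse_date_range date_array → Spec_parse_date_range date_array (parse_date_range date_array)

-- ===== LEMMAS AND PROOFS =====

-- the abstraction relating A's list state to B's pair state
def pvF (acc : List String) : Option String × Option String :=
  (PySem.List.min? acc (fun x => x), PySem.List.max? acc (fun x => x))

theorem pvF_nil : pvF [] = (none, none) := by
  simp [pvF, PySem.List.min?, PySem.List.max?]

theorem pvFoldIn_falsy (p : Option String × Option String) (d : Option String)
    (h : pvTruthyOS d = false) : pvFoldIn p d = p := by
  cases d with
  | none => rfl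
  | some s =>
    simp [pvTruthyOS] at h
    simp [pvFoldIn, h]

theorem pvTruthy_some (d : Option String) (h : pvTruthyOS d = true) :
    ∃ s, d = some s ∧ s ≠ "" := by
  cases d with
  | none => simp [pvTruthyOS] at h
  | some s => exact ⟨s, rfl, by simpa [pvTruthyOS] using h⟩

theorem pvF_append (acc : List String) (x : String) (hx : x ≠ "") :
    pvF (acc ++ [x]) = pvFoldIn (pvF acc) (some x) := by
  cases acc with
  | nil =>
    rw [pvF_nil]
    simp [pvF, pvFoldIn, hx, PySem.List.min?_id_cons, PySem.List.max?_id_cons]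
  | cons a t =>
    rw [show (a :: t) ++ [x] = a :: (t ++ [x]) from rfl]
    rw [pvF, pvF]
    simp only [PySem.List.min?_id_cons, PySem.List.max?_id_cons, List.foldl_append,
      List.foldl_cons, List.foldl_nil]
    have hmin : min (List.foldl min a t) x
        = if x < List.foldl min a t then x else List.foldl min a t := by
      rw [min_def]
      split_ifs with h1 h2 h2
      · exact absurd h1 (not_le.mpr h2)
      · rfl
      · rfl
      · exact absurd (not_lt.mp h2) h1
    have hmax : max (List.foldl max a t) x
        = if List.foldl max a t < x then x else List.foldl max a t := by
      rw [max_def]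
      split_ifs with h1 h2 h2
      · rfl
      · exact le_antisymm (not_lt.mp h2) h1
      · exact absurd (le_of_lt h2) h1
      · rfl
    simp only [pvFoldIn, if_neg hx, hmin, hmax]
    split_ifs <;> simp

theorem pvFoldIn_idem (p : Option String × Option String) (d : Option String) :
    pvFoldIn (pvFoldIn p d) d = pvFoldIn p d := by
  obtain ⟨p1, p2⟩ := p
  cases d with
  | none => rfl
  | some s =>
    by_cases hs : s = ""
    · simp [pvFoldIn, hs]
    · cases p1 with
      | none =>
        cases p2 with
        | none => simp [pvFoldIn, hs]
        | some b => by_cases hb : b < s <;> simp [pvFoldIn, hs, hb]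
      | some a =>
        cases p2 with
        | none => by_cases ha : s < a <;> simp [pvFoldIn, hs, ha]
        | some b =>
          by_cases ha : s < a <;> by_cases hb : b < s <;>
            simp [pvFoldIn, hs, ha, hb]

theorem pvBody_eq (acc : List String) (d0 d1 : Option String) :
    pvF (let acc2 := if pvTruthyOS d0 then acc ++ [d0.getD ""] else acc;
         if pvTruthyOS d1 then acc2 ++ [d1.getD ""]
         else if pvTruthyOS d0 then acc2 ++ [d0.getD ""] else acc2)
      = pvFoldIn (pvFoldIn (pvF acc) d0) d1 := by
  cases h0 : pvTruthyOS d0 with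
  | false =>
    rw [pvFoldIn_falsy _ _ h0]
    cases h1 : pvTruthyOS d1 with
    | false =>
      rw [pvFoldIn_falsy _ _ h1]
      simp
    | true =>
      obtain ⟨s1, rfl, hs1⟩ := pvTruthy_some d1 h1
      simp only [Bool.false_eq_true, if_false, if_true, Option.getD_some]
      exact pvF_append acc s1 hs1
  | true =>
    obtain ⟨s0, rfl, hs0⟩ := pvTruthy_some d0 h0
    cases h1 : pvTruthyOS d1 with
    | false =>
      rw [pvFoldIn_falsy _ _ h1]
      simp only [Bool.false_eq_true, if_false, if_true, Option.getD_some]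
      rw [pvF_append (acc ++ [s0]) s0 hs0, pvF_append acc s0 hs0, pvFoldIn_idem]
    | true =>
      obtain ⟨s1, rfl, hs1⟩ := pvTruthy_some d1 h1
      simp only [if_true, Option.getD_some]
      rw [pvF_append (acc ++ [s0]) s1 hs1, pvF_append acc s0 hs0]

theorem pvStep_eq (acc : List String) (dr : List (Option String)) :
    pvF (pvStepA acc dr) = pvStepB (pvF acc) dr := by
  unfold pvStepA pvStepB
  by_cases hlen : dr.length < 2
  · simp [hlen]
  · simp only [if_neg hlen]
    exact pvBody_eq acc _ _

theorem pvFold_eq (da : List (List (Option String))) (acc : List String) :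
    pvF (da.foldl pvStepA acc) = da.foldl pvStepB (pvF acc) := by
  induction da generalizing acc with
  | nil => rfl
  | cons dr t ih =>
    simp only [List.foldl_cons]
    rw [ih, pvStep_eq]

-- ===== VERDICT (by name: the statement is the Claim_ definition above) =====
theorem parse_date_range_spec : Claim_equal_parse_date_range := by
  intro da _
  unfold Spec_parse_date_range parse_date_range parse_date_range_alt
  cases da with
  | nil => simp
  | cons r t =>
    simp only [if_neg (by simp : ¬((r :: t) = [] ∨ (r :: t).length = 0))]
    have h := pvFold_eq (r :: t) []
    rw [pvF_nil] at h
    by_cases hall : (r :: t).foldl pvStepA [] = []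
    · rw [← h, hall, pvF_nil]
      simp
    · simp only [if_neg hall]
      rw [← h]
      rfl
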